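-- pv_equiv track=rewrite | github.com/iShauny/Botter | cogs/lewd.py | nsfw_in_tags
-- ===== SOURCE A (Python) =====
-- def nsfw_in_tags(tags):
--     nsfw = [
--         "rating:e", "rating:explicit", "rating:q", "rating:questionable"
--     ]
--     if any(x in [tag.lower() for tag in tags] for x in nsfw):
--         return True
--     else:
--         return False
-- ===== SOURCE B (Python) =====
-- def nsfw_in_tags(tags):
--     for tag in tags:
--         t = tag.lower()
--         if t.startswith("rating:") and t[7:] in ("e", "explicit", "q", "questionable"):
--             return True
--     return False
-- ===== Notes on version B (the rewrite author's own statement) =====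
-- stated objective: alternative
-- what changed: B makes a single early-exit pass over the tags and classifies each tag structurally (lowercase, check the 'rating:' prefix, then test the 7-character-stripped suffix against the four rating codes), instead of A's outer loop over the four whole nsfw strings that rebuilds the lowered tag list and scans it for each one; one pass with constant work per tag instead of four rebuild-and-scan passes.
import Mathlib
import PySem

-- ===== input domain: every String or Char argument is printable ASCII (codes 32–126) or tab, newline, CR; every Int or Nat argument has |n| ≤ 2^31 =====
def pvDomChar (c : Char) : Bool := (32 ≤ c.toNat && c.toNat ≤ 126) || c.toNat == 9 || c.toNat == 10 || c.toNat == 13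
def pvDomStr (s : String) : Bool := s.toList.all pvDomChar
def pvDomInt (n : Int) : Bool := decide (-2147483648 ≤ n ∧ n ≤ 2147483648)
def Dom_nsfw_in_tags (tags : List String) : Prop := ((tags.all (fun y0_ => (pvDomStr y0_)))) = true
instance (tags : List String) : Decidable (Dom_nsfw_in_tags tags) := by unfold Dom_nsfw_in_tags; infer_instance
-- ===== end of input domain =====

-- B: single early-exit pass over tags, classifying each tag by its "rating:" prefix and 7-stripped suffix, instead of A's per-nsfw-string scans (alternative decomposition)

-- ===== PORT A =====
def nsfw_in_tags (tags : List String) : Bool :=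
  let nsfw := ["rating:e", "rating:explicit", "rating:q", "rating:questionable"]
  if nsfw.any (fun x => (tags.map (fun tag => PySem.Str.lower tag)).contains x) then true
  else false

-- ===== PORT B =====
def nsfw_in_tags_alt : List String → Bool
  | [] => false
  | tag :: rest =>
    let t := PySem.Str.lower tag
    if PySem.Str.startswith t "rating:" &&
        ["e", "explicit", "q", "questionable"].contains (PySem.Str.slice t (some 7) none) then
      true
    else nsfw_in_tags_alt rest

-- ===== PRECONDITION & SPEC =====
def Spec_nsfw_in_tags (tags : List String) (out : Bool) : Prop := out = nsfw_in_tags_alt tags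
instance (tags : List String) (out : Bool) : Decidable (Spec_nsfw_in_tags tags out) := by unfold Spec_nsfw_in_tags; infer_instance

-- ===== CLAIM (what is proved, stated in full; the proofs are below) =====
def Claim_equal_nsfw_in_tags : Prop := ∀ (tags : List String), Dom_nsfw_in_tags tags → Spec_nsfw_in_tags tags (nsfw_in_tags tags)

-- ===== LEMMAS AND PROOFS =====

-- ===== VERDICT (by name: the statement is the Claim_ definition above) =====
-- per-string classification: t is one of the four nsfw strings iff it starts with
-- "rating:" and its 7-character-stripped suffix is one of the four rating codes
lemma pv_classify (t : String) :
    (["rating:e", "rating:explicit", "rating:q", "rating:questionable"].contains t)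
      = (PySem.Str.startswith t "rating:" &&
          ["e", "explicit", "q", "questionable"].contains (PySem.Str.slice t (some 7) none)) := by
  rw [Bool.eq_iff_iff]
  simp only [List.contains_eq_mem, List.mem_cons, List.not_mem_nil, or_false,
    Bool.and_eq_true, decide_eq_true_eq, PySem.Str.startswith_eq, PySem.Chars.startswith_iff]
  constructor
  · rintro (rfl | rfl | rfl | rfl) <;> exact ⟨by decide, by decide⟩
  · rintro ⟨hp, hs⟩
    obtain ⟨u, hu⟩ := hp
    have hdrop : (PySem.Str.slice t (some 7) none).toList = t.toList.drop 7 := by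
      simp [PySem.List.slice_from (a := 7) (xs := t.toList) (by norm_num)]
    have hu' : t.toList.drop 7 = u := by rw [← hu]; simp
    have key : ∀ s : String, PySem.Str.slice t (some 7) none = s → t.toList = "rating:".toList ++ s.toList := by
      intro s h
      have := congrArg String.toList h
      rw [hdrop, hu'] at this
      rw [← hu, this]
    rcases hs with h | h | h | h
    · exact Or.inl (String.toList_injective ((key _ h).trans (by decide)))
    · exact Or.inr (Or.inl (String.toList_injective ((key _ h).trans (by decide))))
    · exact Or.inr (Or.inr (Or.inl (String.toList_injective ((key _ h).trans (by decide)))))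
    · exact Or.inr (Or.inr (Or.inr (String.toList_injective ((key _ h).trans (by decide)))))

lemma pv_any_swap (L M : List String) :
    L.any (fun x => M.contains x) = M.any (fun x => L.contains x) := by
  rw [Bool.eq_iff_iff]
  simp only [List.any_eq_true, List.contains_eq_mem, decide_eq_true_eq]
  tauto

-- B's early-exit recursion = any over tags of the per-tag test
lemma pv_alt_any (tags : List String) :
    nsfw_in_tags_alt tags
      = tags.any (fun tag =>
          ["rating:e", "rating:explicit", "rating:q", "rating:questionable"].contains
            (PySem.Str.lower tag)) := by
  induction tags with
  | nil => rfl
  | cons tag rest ih =>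
    simp only [nsfw_in_tags_alt, ← pv_classify, ih, List.any_cons]
    cases hc : (["rating:e", "rating:explicit", "rating:q", "rating:questionable"].contains
        (PySem.Str.lower tag)) <;> simp

theorem nsfw_in_tags_spec : Claim_equal_nsfw_in_tags := by
  intro tags _
  show nsfw_in_tags tags = nsfw_in_tags_alt tags
  rw [pv_alt_any]
  have hA : nsfw_in_tags tags
      = (["rating:e", "rating:explicit", "rating:q", "rating:questionable"].any
          (fun x => (tags.map (fun tag => PySem.Str.lower tag)).contains x)) := by
    show (if (["rating:e", "rating:explicit", "rating:q", "rating:questionable"].any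
        (fun x => (tags.map (fun tag => PySem.Str.lower tag)).contains x)) = true
      then true else false) = _
    cases hc : (["rating:e", "rating:explicit", "rating:q", "rating:questionable"].any
        (fun x => (tags.map (fun tag => PySem.Str.lower tag)).contains x)) <;>
      simp
  rw [hA, pv_any_swap, List.any_map]
  rfl
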